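-- pv_equiv track=rewrite | github.com/S0okJu/BOJ | Gold/1000-1999/1300-1399/1394/1394.py | timeout
-- ===== SOURCE A (Python) =====
-- def timeout(available: str, target: str) -> int:
--     """
--     지수 연산으로 인해 시간 초과가 발생함
--     """
--     chars = [ch for ch in available]
--     radix = len(chars)
--     char_to_digit = {ch: i for i, ch in enumerate(chars)}
--
--     count = 0
--     for l in range(1, len(target)):
--         count += radix ** l  # 길이 l인 문자열 개수 누적(타임아웃 원인)
--
--     for i, ch in enumerate(target):
--         digit = char_to_digit[ch]
--         remaining = len(target) - i - 1
--         count += digit * (radix ** remaining)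
--
--     return (count + 1) % 900528  # 인덱스 1-based로 맞춤
-- ===== SOURCE B (Python) =====
-- def timeout(available: str, target: str) -> int:
--     # Horner's rule with the modulus applied at every step: the 1-based rank of
--     # `target` equals sum over its digits d_i of (d_i + 1) * radix^(n-1-i), so a
--     # single left-to-right pass with a running remainder replaces the big-integer
--     # power computations.
--     M = 900528
--     radix = len(available)
--     char_to_digit = {ch: i for i, ch in enumerate(available)}
--     acc = 0
--     for ch in target:
--         acc = (acc * radix + char_to_digit[ch] + 1) % M
--     return acc if target else 1
-- ===== Notes on version B (the rewrite author's own statement) =====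
-- stated objective: faster
-- what changed: B replaces A's two loops over big-integer powers radix**l (O(n^2) bit operations) with a single left-to-right Horner pass that keeps the accumulator reduced mod 900528 at every step.
import Mathlib
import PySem

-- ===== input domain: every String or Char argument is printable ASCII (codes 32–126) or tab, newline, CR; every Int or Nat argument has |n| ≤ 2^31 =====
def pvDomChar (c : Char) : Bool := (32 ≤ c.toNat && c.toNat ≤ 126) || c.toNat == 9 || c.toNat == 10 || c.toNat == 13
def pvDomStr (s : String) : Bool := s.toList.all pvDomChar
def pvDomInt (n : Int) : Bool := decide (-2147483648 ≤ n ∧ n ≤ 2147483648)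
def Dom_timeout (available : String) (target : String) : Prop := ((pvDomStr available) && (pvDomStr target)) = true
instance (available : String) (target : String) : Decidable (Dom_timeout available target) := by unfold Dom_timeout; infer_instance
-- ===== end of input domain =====

-- B replaces A's big-integer power sums with a single Horner pass reduced mod 900528 at
-- every step (measurably faster on long targets); return values agree on all inputs where
-- A returns (Pre_ excludes the KeyError inputs, where both Pythons raise).


-- ===== PORT A =====
-- {ch: i for i, ch in enumerate(chars)}  (shared by both Pythons verbatim)
def charToDigit (chars : List Char) : PySem.Dict Char Int :=
  (PySem.List.enumerate chars 0).foldl (fun d p => d.insert p.2 p.1) PySem.Dict.empty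

def timeout (available : String) (target : String) : Int :=
  let chars := available.toList
  let radix : Int := (chars.length : Int)
  let c2d := charToDigit chars
  -- for l in range(1, len(target)): count += radix ** l
  let count : Int :=
    (PySem.List.pyRange 1 (target.toList.length : Int) 1).foldl
      (fun c l => c + radix ^ l.toNat) 0
  -- for i, ch in enumerate(target): count += c2d[ch] * radix ** (len(target) - i - 1)
  -- (c2d[ch] is a plain lookup: Pre_ guarantees the key is present, so getD is exact there)
  let count : Int :=
    (PySem.List.enumerate target.toList 0).foldl
      (fun c p => c + c2d.getD p.2 0 * radix ^ ((target.toList.length : Int) - p.1 - 1).toNat)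
      count
  (count + 1) % 900528

-- ===== PORT B =====
def timeout_alt (available : String) (target : String) : Int :=
  let radix : Int := (available.toList.length : Int)
  let c2d := charToDigit available.toList
  let acc : Int :=
    target.toList.foldl (fun acc ch => (acc * radix + c2d.getD ch 0 + 1) % 900528) 0
  if target.toList = [] then 1 else acc

-- ===== PRECONDITION & SPEC =====
-- Pre_ excludes exactly the inputs where a character of target is not in available:
-- there both A and B raise KeyError in Python.
def Pre_timeout (available : String) (target : String) : Prop :=
  target.toList.all (fun c => available.toList.contains c) = true
instance (available : String) (target : String) : Decidable (Pre_timeout available target) := by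
  unfold Pre_timeout; infer_instance
def pvWitness_timeout : String × String := ("ab", "ba")
def Spec_timeout (available : String) (target : String) (out : Int) : Prop := out = timeout_alt available target
instance (available : String) (target : String) (out : Int) : Decidable (Spec_timeout available target out) := by unfold Spec_timeout; infer_instance

-- ===== CLAIM (what is proved, stated in full; the proofs are below) =====
def Claim_equal_timeout : Prop := ∀ (available : String) (target : String), Dom_timeout available target → Pre_timeout available target → Spec_timeout available target (timeout available target)

-- ===== LEMMAS AND PROOFS =====

-- Horner without the modulus
def hornerNM (r : Int) (g : Char → Int) (a : Int) (cs : List Char) : Int :=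
  cs.foldl (fun a ch => a * r + g ch + 1) a

theorem hornerNM_append (r : Int) (g : Char → Int) (a : Int) (cs : List Char) (c : Char) :
    hornerNM r g a (cs ++ [c]) = hornerNM r g a cs * r + g c + 1 := by
  simp [hornerNM, List.foldl_append]

-- folding with the modulus at each step equals the plain fold reduced once
theorem horner_mod (r : Int) (g : Char → Int) (cs : List Char) :
    ∀ a : Int,
      cs.foldl (fun a ch => (a * r + g ch + 1) % 900528) (a % 900528)
        = hornerNM r g a cs % 900528 := by
  induction cs with
  | nil => intro a; simp [hornerNM]
  | cons c t ih =>
    intro a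
    have hkey : (a % 900528 * r + g c + 1) % 900528 = (a * r + g c + 1) % 900528 := by
      have h1 : a % 900528 ≡ a [ZMOD 900528] := Int.emod_emod_of_dvd a dvd_rfl
      have h2 := (h1.mul_right r).add_right (g c + 1)
      simpa [Int.ModEq, add_assoc] using h2
    simp only [List.foldl_cons]
    rw [hkey]
    exact ih (a * r + g c + 1)

-- geometric sum step: S n * r + r = S n + r^n for n ≥ 1, where S n = Σ_{l=1}^{n-1} r^l
def geomS (r : Int) (n : Nat) : Int :=
  ((PySem.List.pyRange 1 (n : Int) 1).map (fun l => r ^ l.toNat)).sum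

theorem geomS_succ (r : Int) (n : Nat) (h : 1 ≤ n) :
    geomS r (n + 1) = geomS r n + r ^ n := by
  unfold geomS
  rw [show ((n + 1 : Nat) : Int) = (n : Int) + 1 by push_cast; ring,
      PySem.List.pyRange_one_succ_right (by exact_mod_cast h)]
  simp

theorem geom_key (r : Int) : ∀ n : Nat, 1 ≤ n → geomS r n * r + r = geomS r n + r ^ n := by
  intro n hn
  induction n with
  | zero => omega
  | succ m ih =>
    rcases Nat.eq_or_lt_of_le hn with h1 | h1
    · -- m + 1 = 1
      have : m = 0 := by omega
      subst this
      simp [geomS, PySem.List.pyRange_one_eq_nil (by norm_num : (1:Int) ≤ 1)]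
    · have hm : 1 ≤ m := by omega
      rw [geomS_succ r m hm]
      have := ih hm
      ring_nf
      ring_nf at this
      nlinarith [this]

-- the main closed-form: A's count + 1 equals the Horner value, for nonempty target
theorem main_key (r : Int) (g : Char → Int) :
    ∀ cs : List Char, cs ≠ [] →
      geomS r cs.length
        + ((PySem.List.enumerate cs 0).map
            (fun p => g p.2 * r ^ ((cs.length : Int) - p.1 - 1).toNat)).sum
        + 1
      = hornerNM r g 0 cs := by
  intro cs
  induction cs using List.reverseRecOn with
  | nil => intro h; exact absurd rfl h
  | append_singleton t c ih =>
    intro _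
    rcases eq_or_ne t [] with ht | ht
    · subst ht
      simp [geomS, PySem.List.pyRange_one_eq_nil (by norm_num : (1:Int) ≤ 1),
            PySem.List.enumerate_cons, PySem.List.enumerate_nil, hornerNM]
    · have hlen : 1 ≤ t.length := by
        cases t with
        | nil => exact absurd rfl ht
        | cons _ _ => simp
      have hIH := ih ht
      rw [hornerNM_append]
      have hlen' : (t ++ [c]).length = t.length + 1 := by simp
      rw [hlen', geomS_succ r t.length hlen]
      rw [PySem.List.enumerate_append]
      rw [List.map_append, List.sum_append]
      -- the appended element: index t.length, exponent 0
      have hlast :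
          ((PySem.List.enumerate [c] (0 + t.length)).map
            (fun p => g p.2 * r ^ (((t.length : Nat) + 1 : Int) - p.1 - 1).toNat)).sum
          = g c := by
        simp [PySem.List.enumerate_cons, PySem.List.enumerate_nil]
      -- old elements: exponent grows by one
      have hshift :
          ((PySem.List.enumerate t 0).map
            (fun p => g p.2 * r ^ (((t.length : Nat) + 1 : Int) - p.1 - 1).toNat)).sum
          = ((PySem.List.enumerate t 0).map
            (fun p => g p.2 * r ^ ((t.length : Int) - p.1 - 1).toNat)).sum * r := by
        rw [← List.sum_map_mul_right]
        apply congrArg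
        apply List.map_congr_left
        intro p hp
        rcases (PySem.List.mem_enumerate_iff t 0 p).1 hp with ⟨k, hk, rfl⟩
        have h1 : ((t.length : Nat) + 1 - ((0 : Int) + k) - 1).toNat
            = ((t.length : Int) - ((0 : Int) + k) - 1).toNat + 1 := by
          omega
        rw [h1, pow_succ]
        ring
      have hcast : (((t ++ [c]).length : Nat) : Int) = ((t.length : Nat) + 1 : Int) := by
        simp
      simp only [hlen'] at *
      push_cast at hlast hshift ⊢
      rw [hlast, hshift]
      linear_combination (-1 : Int) * geom_key r t.length hlen + r * hIH

theorem timeout_eq (available target : String) :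
    timeout available target = timeout_alt available target := by
  unfold timeout timeout_alt
  rcases eq_or_ne target.toList [] with h | h
  · rw [h]
    simp [PySem.List.pyRange_one_eq_nil (by norm_num : (0:Int) ≤ 1),
          PySem.List.enumerate_nil]
  · simp only [if_neg h]
    rw [PySem.List.foldl_add (l := PySem.List.pyRange 1 (target.toList.length : Int) 1)
        (g := fun l : Int => ((available.toList.length : Int)) ^ l.toNat) (a := (0 : Int))]
    rw [PySem.List.foldl_add (l := PySem.List.enumerate target.toList 0)
        (g := fun p : Int × Char => (charToDigit available.toList).getD p.2 0 *
          ((available.toList.length : Int)) ^ ((target.toList.length : Int) - p.1 - 1).toNat)]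
    have hB := horner_mod (available.toList.length : Int)
        (fun ch => (charToDigit available.toList).getD ch 0) target.toList 0
    have hM := main_key (available.toList.length : Int)
        (fun ch => (charToDigit available.toList).getD ch 0) target.toList h
    unfold geomS at hM
    simp only [Int.zero_emod] at hB
    beta_reduce at hB hM
    rw [hB, zero_add, hM]

-- ===== VERDICT (by name: the statement is the Claim_ definition above) =====
theorem timeout_spec : Claim_equal_timeout := by
  intro available target _ _
  unfold Spec_timeout
  exact timeout_eq available target
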